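-- pv_equiv track=rewrite | github.com/austral-prog/tp-6-loops-joaquindevoto | enumerate_list.py | enumerate_backwards
-- ===== SOURCE A (Python) =====
-- def enumerate_backwards(lst):
--     """
--     Igual que enumerate_list, pero cada palabra debe estar escrita al reves.
--     Los strings vacios se deben saltear.
--
--     Ejemplo: enumerate_backwards(["Red", "Green", ""]) -> ["0. deR", "1. neerG"]
--     """
--     resultado = []
--     indice_consecutivo = 0
--
--     for palabra in lst:
--         if palabra != "":
--             palabra_al_reves = palabra[::-1]
--             item = f"{indice_consecutivo}. {palabra_al_reves}"
--             resultado.append(item)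
--             indice_consecutivo += 1
--
--     return resultado
-- ===== SOURCE B (Python) =====
-- def enumerate_backwards(lst):
--     # Build the answer back-to-front: walk the list in REVERSE with a countdown
--     # index starting at the total number of non-empty words, then flip the output.
--     i = sum(1 for p in lst if p != "")
--     out = []
--     for p in reversed(lst):
--         if p != "":
--             i -= 1
--             out.append("%d. %s" % (i, "".join(reversed(p))))
--     out.reverse()
--     return out
-- ===== Notes on version B (the rewrite author's own statement) =====
-- stated objective: alternative
-- what changed: Instead of A's single forward pass with an incrementing counter, B first counts the non-empty words, then traverses the list in reverse with a countdown index, building the output back-to-front and reversing it at the end; the word is reversed via join(reversed(...)) instead of slicing.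
import Mathlib
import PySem

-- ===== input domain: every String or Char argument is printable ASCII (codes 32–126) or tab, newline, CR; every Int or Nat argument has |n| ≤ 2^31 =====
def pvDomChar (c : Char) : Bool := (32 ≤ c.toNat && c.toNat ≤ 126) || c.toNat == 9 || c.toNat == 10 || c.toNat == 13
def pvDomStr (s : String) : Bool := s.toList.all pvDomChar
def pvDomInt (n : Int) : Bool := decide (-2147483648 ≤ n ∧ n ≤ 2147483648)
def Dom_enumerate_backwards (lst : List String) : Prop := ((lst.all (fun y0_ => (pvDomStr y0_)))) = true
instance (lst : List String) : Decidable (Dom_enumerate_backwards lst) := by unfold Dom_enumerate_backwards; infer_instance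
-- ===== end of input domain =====

-- B replaces A's forward pass with an incrementing counter by: count the non-empty words,
-- then walk the list in reverse with a countdown index and reverse the output (alternative).

-- ===== PORT A =====

-- p[::-1]: slice with step -1 never raises (step ≠ 0), so the getD default is never used
def pvRevA (s : String) : String := (PySem.Str.slice? s none none (-1)).getD s

-- f"{indice_consecutivo}. {palabra_al_reves}"
def pvItemA (i : Int) (r : String) : String := PySem.Int.toStr i ++ ". " ++ r

def enumerate_backwards (lst : List String) : List String :=
  (lst.foldl
    (fun (st : List String × Int) palabra =>
      if palabra ≠ "" then
        (st.1 ++ [pvItemA st.2 (pvRevA palabra)], st.2 + 1)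
      else st)
    ([], 0)).1

-- ===== PORT B =====

-- "%d. %s" % (i, "".join(reversed(p)))
def pvItemB (i : Int) (p : String) : String :=
  PySem.Int.toStr i ++ ". " ++ String.ofList p.toList.reverse

def enumerate_backwards_alt (lst : List String) : List String :=
  -- i = sum(1 for p in lst if p != "")
  let i0 : Int := lst.foldl (fun n p => if p ≠ "" then n + 1 else n) 0
  -- for p in reversed(lst): if p != "": i -= 1; out.append(...)
  let st := lst.reverse.foldl
    (fun (st : List String × Int) p =>
      if p ≠ "" then (st.1 ++ [pvItemB (st.2 - 1) p], st.2 - 1) else st)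
    ([], i0)
  st.1.reverse

-- ===== PRECONDITION & SPEC =====
def Spec_enumerate_backwards (lst : List String) (out : List String) : Prop := out = enumerate_backwards_alt lst
instance (lst : List String) (out : List String) : Decidable (Spec_enumerate_backwards lst out) := by unfold Spec_enumerate_backwards; infer_instance

-- ===== CLAIM (what is proved, stated in full; the proofs are below) =====
def Claim_equal_enumerate_backwards : Prop := ∀ (lst : List String), Dom_enumerate_backwards lst → Spec_enumerate_backwards lst (enumerate_backwards lst)

-- ===== LEMMAS AND PROOFS =====

-- canonical result, indexed from i
def pvCanon (i : Int) : List String → List String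
  | [] => []
  | p :: t => if p = "" then pvCanon i t else pvItemB i p :: pvCanon (i + 1) t

theorem pvItem_eq (i : Int) (p : String) : pvItemA i (pvRevA p) = pvItemB i p := by
  simp [pvItemA, pvItemB, pvRevA, PySem.Str.slice?_none_none_neg_one]

-- A's loop computes pvCanon, the counter being i plus the items emitted
theorem eb_A (xs : List String) (acc : List String) (i : Int) :
    xs.foldl
      (fun (st : List String × Int) palabra =>
        if palabra ≠ "" then (st.1 ++ [pvItemA st.2 (pvRevA palabra)], st.2 + 1) else st)
      (acc, i)
    = (acc ++ pvCanon i xs, i + xs.countP (fun p => p ≠ "")) := by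
  induction xs generalizing acc i with
  | nil => simp [pvCanon]
  | cons p t ih =>
    by_cases hp : p = ""
    · rw [List.foldl_cons, if_neg (by simp [hp]), ih]
      simp [pvCanon, hp]
    · rw [List.foldl_cons, if_pos (by simp [hp]), ih, pvItem_eq]
      simp [pvCanon, hp, Prod.ext_iff]
      omega

-- the count loop
theorem eb_count (xs : List String) (n : Int) :
    xs.foldl (fun n p => if p ≠ "" then n + 1 else n) n
      = n + xs.countP (fun p => p ≠ "") := by
  induction xs generalizing n with
  | nil => simp
  | cons p t ih =>
    by_cases hp : p = ""
    · rw [List.foldl_cons, if_neg (by simp [hp]), ih]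
      simp [hp]
    · rw [List.foldl_cons, if_pos (by simp [hp]), ih]
      simp [hp]
      omega

-- B's reverse loop builds pvCanon reversed, counting DOWN from i + count xs to i
theorem eb_B (xs : List String) (acc : List String) (i : Int) :
    xs.reverse.foldl
      (fun (st : List String × Int) p =>
        if p ≠ "" then (st.1 ++ [pvItemB (st.2 - 1) p], st.2 - 1) else st)
      (acc, i + xs.countP (fun p => p ≠ ""))
    = (acc ++ (pvCanon i xs).reverse, i) := by
  induction xs generalizing acc i with
  | nil => simp [pvCanon]
  | cons p t ih =>
    by_cases hp : p = ""
    · have hc : (i + ((p :: t).countP (fun q => q ≠ "") : Int))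
          = i + (t.countP (fun q => q ≠ "") : Int) := by
        simp [hp]
      rw [List.reverse_cons, List.foldl_append, hc, ih acc i]
      simp [hp, pvCanon]
    · have hc : (i + ((p :: t).countP (fun q => q ≠ "") : Int))
          = (i + 1) + (t.countP (fun q => q ≠ "") : Int) := by
        simp [hp]
        ring
      rw [List.reverse_cons, List.foldl_append, hc, ih acc (i + 1)]
      simp [hp, pvCanon]

-- ===== VERDICT (by name: the statement is the Claim_ definition above) =====
theorem enumerate_backwards_spec : Claim_equal_enumerate_backwards := by
  intro lst _
  unfold Spec_enumerate_backwards enumerate_backwards enumerate_backwards_alt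
  simp only [eb_A, eb_count]
  have := eb_B lst [] 0
  rw [show ((0:Int) + (lst.countP (fun p => p ≠ "") : Int)) = 0 + (lst.countP (fun p => p ≠ "") : Int) from rfl] at this
  rw [this]
  simp
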